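-- pv_equiv track=rewrite | github.com/PabloCabreraR/Codewars | Python/6kyu/encryptThis.py | encrypt_this
-- ===== SOURCE A (Python) =====
-- def encrypt_this(text):
--     if len(text) == 0:
--         return text
--     else:
--         text_array = text.split(' ')
--         encrypted_array = []
--         for word in text_array:
--             asci_char = ord(word[0])
--             last_char = word[-1]
--             if (len(word) == 2):
--                 word = str(asci_char)+last_char
--             elif (len(word) > 2):
--                 middle_char = word[1]
--                 rest = word[2:-1]
--                 word = str(asci_char)+last_char+rest+middle_char
--             else:
--                 word = str(asci_char)
--             encrypted_array.append(word)
--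
--         return " ".join(encrypted_array)
-- ===== SOURCE B (Python) =====
-- def encrypt_this(text):
--     if len(text) == 0:
--         return text
--     out = []
--     buf = None  # None: waiting for a word's first char; else chars seen after the first
--     for ch in text + ' ':  # sentinel space flushes the final word
--         if ch == ' ':
--             if len(buf) >= 2:
--                 out.append(buf[-1])
--                 out.extend(buf[1:-1])
--                 out.append(buf[0])
--             else:
--                 out.extend(buf)
--             out.append(' ')
--             buf = None
--         elif buf is None:
--             out.append(str(ord(ch)))
--             buf = []
--         else:
--             buf.append(ch)
--     return ''.join(out[:-1])
-- ===== Notes on version B (the rewrite author's own statement) =====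
-- stated objective: alternative
-- what changed: Replaces A's split-into-words / per-word three-branch slicing / join pipeline by a single left-to-right character scan with a word buffer flushed at each space (a sentinel space flushes the last word); no split or join of words is performed. Pre_ excludes texts whose split(' ') contains an empty word, on which both A and B raise.
-- outside the precondition, e.g. on encrypt_this(' '): A raises IndexError, B raises TypeError
import Mathlib
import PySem

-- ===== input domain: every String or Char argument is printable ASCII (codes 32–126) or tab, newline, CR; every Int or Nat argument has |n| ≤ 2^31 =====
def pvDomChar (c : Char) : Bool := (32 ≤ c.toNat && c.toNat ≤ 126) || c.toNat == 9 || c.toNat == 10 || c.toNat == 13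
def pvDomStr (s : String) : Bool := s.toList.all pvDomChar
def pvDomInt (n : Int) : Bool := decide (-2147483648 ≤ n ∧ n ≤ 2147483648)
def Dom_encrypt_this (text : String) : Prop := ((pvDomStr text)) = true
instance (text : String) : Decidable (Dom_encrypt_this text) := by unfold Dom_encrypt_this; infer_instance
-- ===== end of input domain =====

-- B replaces A's split/per-word-slice/join pipeline by a single left-to-right character
-- scan with a word buffer flushed at each space (sentinel space flushes the last word).
-- Pre_ excludes texts whose split(' ') contains an empty word (adjacent, leading or
-- trailing spaces): there A raises IndexError (word[0]) and B raises TypeError (len(None)).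


-- ===== PORT A =====
-- one iteration of A's loop body (word[0]/word[-1] raise on an empty word: none → excluded by Pre_, [] is a dummy)
def encAWord (w : List Char) : List Char :=
  match PySem.List.pyGet? w 0, PySem.List.pyGet? w (-1) with
  | some c0, some last_char =>
    let asci_char := (PySem.Int.toStr (c0.toNat : Int)).toList
    if w.length == 2 then asci_char ++ [last_char]
    else if w.length > 2 then
      let middle_char := PySem.List.pyGetD w 1 ' '
      let rest := PySem.List.slice w (some 2) (some (-1))
      asci_char ++ [last_char] ++ rest ++ [middle_char]
    else asci_char
  | _, _ => []

def encrypt_this (text : String) : String :=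
  if PySem.Str.len text == 0 then text
  else
    let text_array := PySem.Chars.splitOn text.toList [' ']
    let encrypted_array := text_array.foldl (fun acc w => acc ++ [encAWord w]) ([] : List (List Char))
    String.ofList (PySem.Chars.join [' '] encrypted_array)

-- ===== PORT B =====
-- one iteration of B's loop body; state = (out : list of emitted strings, buf : Option word-tail buffer)
-- Python's len(None) raises TypeError at a space with buf None: excluded by Pre_, state unchanged is a dummy
def bStep (st : List (List Char) × Option (List Char)) (ch : Char) : List (List Char) × Option (List Char) :=
  if ch = ' ' then
    match st.2 with
    | none => st
    | some b =>
      let out :=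
        if 2 ≤ b.length then
          st.1 ++ [[PySem.List.pyGetD b (-1) ' ']]
               ++ (PySem.List.slice b (some 1) (some (-1))).map (fun c => [c])
               ++ [[PySem.List.pyGetD b 0 ' ']]
        else st.1 ++ b.map (fun c => [c])
      (out ++ [[' ']], none)
  else
    match st.2 with
    | none => (st.1 ++ [(PySem.Int.toStr (ch.toNat : Int)).toList], some [])
    | some b => (st.1, some (b ++ [ch]))

def encrypt_this_alt (text : String) : String :=
  if PySem.Str.len text == 0 then text
  else
    let st := (text.toList ++ [' ']).foldl bStep ([], none)
    String.ofList (PySem.Chars.join [] (PySem.List.slice st.1 none (some (-1))))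

-- ===== PRECONDITION & SPEC =====
-- Pre_ excludes texts containing an empty word after split(' '): both Pythons raise there.
def Pre_encrypt_this (text : String) : Prop :=
  text.toList = [] ∨ ∀ w ∈ PySem.Chars.splitOn text.toList [' '], w ≠ []
instance (text : String) : Decidable (Pre_encrypt_this text) := by unfold Pre_encrypt_this; infer_instance

def pvWitness_encrypt_this : String := "Hello World"

def Spec_encrypt_this (text : String) (out : String) : Prop := out = encrypt_this_alt text
instance (text : String) (out : String) : Decidable (Spec_encrypt_this text out) := by unfold Spec_encrypt_this; infer_instance

-- ===== CLAIM (what is proved, stated in full; the proofs are below) =====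
def Claim_equal_encrypt_this : Prop := ∀ (text : String), Dom_encrypt_this text → Pre_encrypt_this text → Spec_encrypt_this text (encrypt_this text)

-- ===== LEMMAS AND PROOFS =====

def splitList (pre : List Char) : List Char → List (List Char)
  | [] => [pre]
  | c :: rest => if c = ' ' then pre :: splitList [] rest else splitList (pre ++ [c]) rest

theorem go_spec (fuel : Nat) : ∀ (l cur : List Char) (acc2 : List (List Char)), l.length ≤ fuel →
    PySem.Chars.splitOn.go [' '] fuel l cur acc2 = acc2.reverse ++ splitList cur.reverse l := by
  induction fuel with
  | zero =>
    intro l cur acc2 h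
    have : l = [] := List.eq_nil_of_length_eq_zero (Nat.le_zero.mp h)
    subst this
    simp [PySem.Chars.splitOn.go, splitList]
  | succ fuel ih =>
    intro l cur acc2 h
    cases l with
    | nil => simp [PySem.Chars.splitOn.go, splitList]
    | cons c rest =>
      by_cases hc : c = ' '
      · subst hc
        simp only [PySem.Chars.splitOn.go, List.isPrefixOf, splitList]
        simp [ih rest [] (cur.reverse :: acc2) (by simpa using Nat.le_of_succ_le_succ h)]
      · simp only [PySem.Chars.splitOn.go, splitList]
        have hpre : ([' '] : List Char).isPrefixOf (c :: rest) = false := by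
          simp [List.isPrefixOf]
          intro h'; exact absurd h'.symm hc
        simp [hpre, hc, ih rest (c :: cur) acc2 (by simpa using Nat.le_of_succ_le_succ h)]

theorem splitOn_eq_splitList (s : List Char) : PySem.Chars.splitOn s [' '] = splitList [] s := by
  show PySem.Chars.splitOn.go [' '] (s.length + 1) s [] [] = _
  simpa using go_spec (s.length + 1) s [] [] (by omega)

theorem splitList_ne_nil (pre l : List Char) : splitList pre l ≠ [] := by
  induction l generalizing pre with
  | nil => simp [splitList]
  | cons c rest ih => by_cases hc : c = ' ' <;> simp [splitList, hc, ih]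

theorem join_splitList (l : List Char) : ∀ pre, PySem.Chars.join [' '] (splitList pre l) = pre ++ l := by
  induction l with
  | nil => intro pre; simp [splitList, PySem.Chars.join, List.intercalate]
  | cons c rest ih =>
    intro pre
    by_cases hc : c = ' '
    · subst hc
      rw [show splitList pre (' '::rest) = pre :: splitList [] rest from by simp [splitList]]
      rcases hr : splitList [] rest with _ | ⟨q, qs⟩
      · exact absurd hr (splitList_ne_nil [] rest)
      · rw [PySem.Chars.join_cons_cons, ← hr, ih []]
        simp
    · simp only [splitList, if_neg hc]
      rw [ih (pre ++ [c])]
      simp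

theorem spacefree_splitList (l : List Char) : ∀ pre w, ' ' ∉ pre → w ∈ splitList pre l → ' ' ∉ w := by
  induction l with
  | nil => intro pre w hp hw; simp [splitList] at hw; subst hw; exact hp
  | cons c rest ih =>
    intro pre w hp hw
    by_cases hc : c = ' '
    · subst hc
      rw [show splitList pre (' '::rest) = pre :: splitList [] rest from by simp [splitList]] at hw
      rcases List.mem_cons.mp hw with rfl | hw
      · exact hp
      · exact ih [] w (by simp) hw
    · simp only [splitList, if_neg hc] at hw
      exact ih (pre ++ [c]) w (by simp [hp]; exact fun h => hc h.symm) hw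

def flushPieces (b : List Char) : List (List Char) :=
  if 2 ≤ b.length then
    [[PySem.List.pyGetD b (-1) ' ']] ++ (PySem.List.slice b (some 1) (some (-1))).map (fun c => [c])
      ++ [[PySem.List.pyGetD b 0 ' ']]
  else b.map (fun c => [c])

def wordPieces : List Char → List (List Char)
  | [] => []
  | c :: tail => (PySem.Int.toStr (c.toNat : Int)).toList :: flushPieces tail

theorem join_nil_flatten (l : List (List Char)) : PySem.Chars.join [] l = l.flatten := by
  show [].intercalate l = l.flatten
  induction l with
  | nil => rfl
  | cons x xs ih =>
    cases xs with
    | nil => simp [List.intercalate]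
    | cons y ys =>
      simp only [List.intercalate] at *
      simp [List.intersperse] at *
      simpa using ih

theorem foldl_bStep_buf (cs : List Char) : ∀ out b, (∀ c ∈ cs, c ≠ ' ') →
    cs.foldl bStep (out, some b) = (out, some (b ++ cs)) := by
  induction cs with
  | nil => intro out b _; simp
  | cons c cs ih =>
    intro out b h
    have hc : c ≠ ' ' := h c (by simp)
    simp only [List.foldl_cons]
    rw [show bStep (out, some b) c = (out, some (b ++ [c])) from by simp [bStep, hc]]
    rw [ih out (b ++ [c]) (fun x hx => h x (by simp [hx]))]
    simp

theorem foldl_bStep_word (w : List Char) (hw : w ≠ []) (hsf : ' ' ∉ w) (out : List (List Char)) :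
    (w ++ [' ']).foldl bStep (out, none) = (out ++ wordPieces w ++ [[' ']], none) := by
  cases w with
  | nil => exact absurd rfl hw
  | cons c tail =>
    have hc : c ≠ ' ' := fun h => hsf (by simp [h])
    have htail : ∀ x ∈ tail, x ≠ ' ' := fun x hx h => hsf (by simp [h] at hx ⊢; right; exact hx)
    simp only [List.cons_append, List.foldl_cons]
    rw [show bStep (out, none) c = (out ++ [(PySem.Int.toStr (c.toNat : Int)).toList], some []) from by
      simp [bStep, hc]]
    rw [List.foldl_append, foldl_bStep_buf tail _ [] htail]
    simp only [List.nil_append, List.foldl_cons, List.foldl_nil]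
    rw [show ∀ o b, bStep (o, some b) ' ' = (o ++ flushPieces b ++ [[' ']], none) from by
      intro o b; simp [bStep, flushPieces]; split <;> simp]
    simp [wordPieces]

theorem join_trailing (ws : List (List Char)) (h : ws ≠ []) :
    PySem.Chars.join [' '] ws ++ [' '] = ws.flatMap (fun w => w ++ [' ']) := by
  induction ws with
  | nil => exact absurd rfl h
  | cons w rest ih =>
    cases rest with
    | nil => simp [PySem.Chars.join, List.intercalate]
    | cons q qs =>
      rw [PySem.Chars.join_cons_cons]
      have h2 := ih (by simp)
      simp only [List.flatMap_cons] at h2 ⊢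
      simp only [List.append_assoc]
      rw [h2]
      simp

theorem foldl_bStep_run (ws : List (List Char)) : ∀ out, (∀ w ∈ ws, w ≠ [] ∧ ' ' ∉ w) →
    (ws.flatMap (fun w => w ++ [' '])).foldl bStep (out, none)
      = (out ++ ws.flatMap (fun w => wordPieces w ++ [[' ']]), none) := by
  induction ws with
  | nil => intro out _; simp
  | cons w rest ih =>
    intro out h
    obtain ⟨hne, hsf⟩ := h w (by simp)
    simp only [List.flatMap_cons]
    rw [List.foldl_append, foldl_bStep_word w hne hsf out,
      ih _ (fun x hx => h x (by simp [hx]))]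
    simp

theorem flatten_singletons (cs : List Char) : (List.map (fun c => ([c] : List Char)) cs).flatten = cs := by
  induction cs with
  | nil => rfl
  | cons a as ih => simp [ih]

theorem wordPieces_join (w : List Char) (hw : w ≠ []) :
    PySem.Chars.join [] (wordPieces w) = encAWord w := by
  match w with
  | [c] =>
    simp only [wordPieces, flushPieces, join_nil_flatten]
    simp only [encAWord, PySem.List.pyGet?_zero_cons, PySem.List.pyGet?_neg_one]
    simp
  | [c, d] =>
    simp only [wordPieces, flushPieces, join_nil_flatten]
    simp only [encAWord, PySem.List.pyGet?_zero_cons, PySem.List.pyGet?_neg_one]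
    simp
  | c :: d :: e :: es =>
    rcases (e :: es).eq_nil_or_concat with habs | ⟨mid, z, hmz⟩
    · simp at habs
    · rw [List.concat_eq_append] at hmz
      rw [hmz]
      simp only [wordPieces, flushPieces, join_nil_flatten]
      simp only [encAWord, PySem.List.pyGet?_zero_cons]
      rw [show (c :: d :: (mid ++ [z])) = (c :: d :: mid) ++ [z] from by simp,
          PySem.List.pyGet?_neg_one_append_singleton]
      rw [show (d :: (mid ++ [z])) = (d :: mid) ++ [z] from by simp,
          PySem.List.pyGetD_neg_one_append_singleton]
      have hlen : 2 ≤ ((d :: mid) ++ [z]).length := by simp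
      rw [if_pos hlen]
      have hL2 : ((c :: d :: mid ++ [z]).length == 2) = false := by simp
      have hgt : (c :: d :: mid ++ [z]).length > 2 := by simp
      rw [hL2]
      simp only [Bool.false_eq_true, if_false, if_pos hgt]
      have hs1 : PySem.List.slice ((d :: mid) ++ [z]) (some 1) (some (-1)) = mid := by
        simp [PySem.List.slice]
      have hs2 : PySem.List.slice (c :: d :: mid ++ [z]) (some 2) (some (-1)) = mid := by
        simp [PySem.List.slice]
      have hg0 : PySem.List.pyGetD ((d :: mid) ++ [z]) 0 ' ' = d := by
        rw [show (d :: mid) ++ [z] = d :: (mid ++ [z]) from by simp]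
        exact PySem.List.pyGetD_zero_cons d (mid ++ [z]) ' '
      have hg1 : PySem.List.pyGetD (c :: d :: mid ++ [z]) 1 ' ' = d := by
        rw [PySem.List.pyGetD_ofNat']
        rfl
      rw [hs1, hs2, hg0, hg1]
      simp [flatten_singletons]

theorem out_join (ws : List (List Char)) (h : ws ≠ []) (hall : ∀ w ∈ ws, w ≠ []) :
    PySem.Chars.join [] ((ws.flatMap (fun w => wordPieces w ++ [[' ']])).dropLast)
      = PySem.Chars.join [' '] (ws.map encAWord) := by
  induction ws with
  | nil => exact absurd rfl h
  | cons w rest ih =>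
    cases rest with
    | nil =>
      simp only [List.flatMap_cons, List.flatMap_nil, List.append_nil]
      rw [List.dropLast_concat, wordPieces_join w (hall w (by simp))]
      simp [PySem.Chars.join, List.intercalate]
    | cons q qs =>
      have hrest : (q :: qs).flatMap (fun w => wordPieces w ++ [[' ']]) ≠ [] := by simp
      have hstep : (w :: q :: qs).flatMap (fun w => wordPieces w ++ [[' ']])
          = (wordPieces w ++ [[' ']]) ++ (q :: qs).flatMap (fun w => wordPieces w ++ [[' ']]) := by
        simp
      rw [hstep, List.dropLast_append_of_ne_nil hrest, join_nil_flatten, List.flatten_append,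
          ← join_nil_flatten (((q :: qs).flatMap (fun w => wordPieces w ++ [[' ']])).dropLast),
          ih (by simp) (fun x hx => hall x (by simp [hx])),
          List.flatten_append, ← join_nil_flatten (wordPieces w),
          wordPieces_join w (hall w (by simp))]
      simp only [List.map_cons, PySem.Chars.join_cons_cons]
      simp

theorem encrypt_this_eq_alt (text : String) (hpre : Pre_encrypt_this text) :
    encrypt_this text = encrypt_this_alt text := by
  unfold encrypt_this encrypt_this_alt
  by_cases h0 : PySem.Str.len text == 0
  · have ht : text = "" := by
      simp [PySem.Str.len_eq] at h0
      exact (String.empty_eq_iff.mpr h0).symm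
    simp [ht]
  · simp only [h0, Bool.false_eq_true, if_false]
    have htne : text.toList ≠ [] := by
      intro h; apply h0; simp [PySem.Str.len_eq, h]
    have hall : ∀ w ∈ splitList [] text.toList, w ≠ [] := by
      unfold Pre_encrypt_this at hpre
      rcases hpre with h | h
      · exact absurd h htne
      · rw [splitOn_eq_splitList] at h; exact h
    have hsf : ∀ w ∈ splitList [] text.toList, ' ' ∉ w :=
      fun w hw => spacefree_splitList _ [] w (by simp) hw
    have hne := splitList_ne_nil [] text.toList
    have htext : text.toList = PySem.Chars.join [' '] (splitList [] text.toList) := by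
      rw [join_splitList text.toList []]; rfl
    congr 1
    rw [splitOn_eq_splitList, PySem.List.foldl_append_singleton_eq_map, PySem.List.slice_to_neg_one]
    conv_rhs => rw [htext]
    rw [join_trailing _ hne, foldl_bStep_run _ _ (fun w hw => ⟨hall w hw, hsf w hw⟩)]
    simp only [List.nil_append]
    exact (out_join _ hne hall).symm

-- ===== VERDICT (by name: the statement is the Claim_ definition above) =====
theorem encrypt_this_spec : Claim_equal_encrypt_this := by
  intro text _hdom hpre
  exact encrypt_this_eq_alt text hpre
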